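-- pv_equiv track=rewrite | github.com/pypi-data/pypi-mirror-330 | packages/mag-tools/mag_tools-0.2.190.tar.gz/mag_tools-0.2.190/mag_tools/utils/data/list_utils.py | split_by_keywords
-- ===== SOURCE A (Python) =====
-- from typing import Any, Dict, List, Optional, Tuple
--
-- def split_by_keywords(lines: List[str], keywords: List[str]) -> Dict[str, List[str]]:
--     segments = {keyword: [] for keyword in keywords}
--     current_keyword = None
--
--     for line in lines:
--         if line in keywords:
--             current_keyword = line
--         segments[current_keyword].append(line)
--
--     return segments
-- ===== SOURCE B (Python) =====
-- def split_by_keywords(lines, keywords):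
--     # Run-wise grouping: cut the line list into runs, each starting at a keyword
--     # line (or at the very beginning), and extend the segment with a whole run
--     # at a time instead of appending line by line.
--     kw = set(keywords)
--     segments = {k: [] for k in keywords}
--     current = None
--     rest = lines
--     while rest:
--         head = rest[0]
--         if head in kw:
--             current = head
--         i = 1
--         while i < len(rest) and rest[i] not in kw:
--             i += 1
--         segments[current].extend(rest[:i])
--         rest = rest[i:]
--     return segments
-- ===== Notes on version B (the rewrite author's own statement) =====
-- stated objective: alternative
-- what changed: B cuts the line list into keyword-delimited runs (inner scan to the next keyword) and extends each segment with a whole run at once, instead of A's per-line dict append with a per-line list-membership test; keyword membership is via a set.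
-- outside the precondition, e.g. on split_by_keywords(['a'], ['k']): A raises KeyError, B raises KeyError
import Mathlib
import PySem

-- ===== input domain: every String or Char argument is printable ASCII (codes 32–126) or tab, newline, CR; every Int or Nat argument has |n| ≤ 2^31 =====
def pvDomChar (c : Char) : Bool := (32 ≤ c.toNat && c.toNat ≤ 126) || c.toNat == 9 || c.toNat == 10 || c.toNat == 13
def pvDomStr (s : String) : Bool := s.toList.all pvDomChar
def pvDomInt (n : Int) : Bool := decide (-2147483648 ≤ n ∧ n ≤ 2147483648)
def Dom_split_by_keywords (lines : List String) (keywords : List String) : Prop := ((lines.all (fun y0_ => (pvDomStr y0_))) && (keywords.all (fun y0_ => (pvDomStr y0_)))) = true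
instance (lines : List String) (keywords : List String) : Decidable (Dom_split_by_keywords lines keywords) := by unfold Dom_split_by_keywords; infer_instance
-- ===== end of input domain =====

-- B groups the lines into keyword-delimited runs and extends each segment run-wise,
-- instead of A's per-line append; equivalence is proved on inputs where A does not raise.

-- ===== PORT A =====
-- one iteration of A's for-loop; the `none` branch is Python's KeyError
-- (segments[None]), excluded by Pre_split_by_keywords
def pvAStep (keywords : List String)
    (st : PySem.Dict String (List String) × Option String) (line : String) :
    PySem.Dict String (List String) × Option String :=
  let cur := if keywords.contains line then some line else st.2
  match cur with
  | none => (st.1, none)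
  | some k => (st.1.modify k [] (fun xs => xs ++ [line]), some k)

def split_by_keywords (lines : List String) (keywords : List String) : List (String × List String) :=
  let segments : PySem.Dict String (List String) :=
    keywords.foldl (fun d k => d.insert k ([] : List String)) (PySem.Dict.mk [])
  (lines.foldl (pvAStep keywords) (segments, none)).1.items

-- ===== PORT B =====
-- B's outer while-loop: peel one run (head plus following non-keyword lines,
-- found by the inner scan) and extend the current segment with it; the `none`
-- branch is Python's KeyError, excluded by Pre_split_by_keywords
def pvBRuns (kw : PySem.Set String)
    (segs : PySem.Dict String (List String)) (cur : Option String) :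
    List String → PySem.Dict String (List String)
  | [] => segs
  | head :: tail =>
      let cur' := if kw.contains head then some head else cur
      let body := tail.takeWhile (fun l => !kw.contains l)
      let segs' := match cur' with
        | none => segs
        | some k => segs.modify k [] (fun xs => xs ++ (head :: body))
      pvBRuns kw segs' cur' (tail.dropWhile (fun l => !kw.contains l))
  termination_by rest => rest.length
  decreasing_by
    simpa using Nat.lt_succ_of_le (List.length_dropWhile_le _ _)

def split_by_keywords_alt (lines : List String) (keywords : List String) : List (String × List String) :=
  let kw : PySem.Set String := PySem.Set.ofList keywords
  let segments : PySem.Dict String (List String) :=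
    keywords.foldl (fun d k => d.insert k ([] : List String)) (PySem.Dict.mk [])
  (pvBRuns kw segments none lines).items

-- ===== PRECONDITION & SPEC =====
-- Pre_ excludes exactly the inputs where Python A raises KeyError: a nonempty
-- line list whose first line is not a keyword (lines before the first keyword).
def Pre_split_by_keywords (lines : List String) (keywords : List String) : Prop :=
  ∀ x ∈ lines.take 1, x ∈ keywords
instance (lines : List String) (keywords : List String) : Decidable (Pre_split_by_keywords lines keywords) := by unfold Pre_split_by_keywords; infer_instance

def pvWitness_split_by_keywords : List String × List String := (["k", "a", "m", "b"], ["k", "m"])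

def Spec_split_by_keywords (lines : List String) (keywords : List String) (out : List (String × List String)) : Prop := out = split_by_keywords_alt lines keywords
instance (lines : List String) (keywords : List String) (out : List (String × List String)) : Decidable (Spec_split_by_keywords lines keywords out) := by unfold Spec_split_by_keywords; infer_instance

-- ===== CLAIM (what is proved, stated in full; the proofs are below) =====
def Claim_equal_split_by_keywords : Prop := ∀ (lines : List String) (keywords : List String), Dom_split_by_keywords lines keywords → Pre_split_by_keywords lines keywords → Spec_split_by_keywords lines keywords (split_by_keywords lines keywords)

-- ===== LEMMAS AND PROOFS =====

theorem pv_contains_ofList (ks : List String) (x : String) :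
    (PySem.Set.ofList ks).contains x = ks.contains x := by
  simp [PySem.Set.contains, PySem.Set.mem_ofList]

-- composing two single-key extends is one extend
theorem pv_modify_modify (d : PySem.Dict String (List String))
    (k : String) (c c' : List String) :
    (d.modify k [] (fun xs => xs ++ c)).modify k [] (fun xs => xs ++ c')
      = d.modify k [] (fun xs => xs ++ (c ++ c')) := by
  simp [PySem.Dict.modify, PySem.Dict.getD_insert_self, PySem.Dict.insert_insert_self]

-- A's per-line loop over a keyword-free block, with a current keyword: one extend
theorem pv_foldl_body_some (keywords : List String) (body : List String)
    (h : ∀ b ∈ body, keywords.contains b = false) :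
    ∀ (c : List String) (d : PySem.Dict String (List String)) (k : String),
    body.foldl (pvAStep keywords) (d.modify k [] (fun xs => xs ++ c), some k)
      = (d.modify k [] (fun xs => xs ++ (c ++ body)), some k) := by
  induction body with
  | nil => intro c d k; simp
  | cons b bs ih =>
      intro c d k
      have hb : keywords.contains b = false := h b (by simp)
      have hbs : ∀ x ∈ bs, keywords.contains x = false := fun x hx => h x (by simp [hx])
      rw [List.foldl_cons]
      have h1 : pvAStep keywords (d.modify k [] fun xs => xs ++ c, some k) b
          = ((d.modify k [] fun xs => xs ++ c).modify k [] fun xs => xs ++ [b], some k) := by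
        have hb' : b ∉ keywords := by simpa using hb
        simp [pvAStep, hb']
      rw [h1, pv_modify_modify, ih hbs (c ++ [b]) d k]
      simp

-- A's per-line loop over a keyword-free block with no current keyword: no-op
theorem pv_foldl_body_none (keywords : List String) (body : List String)
    (h : ∀ b ∈ body, keywords.contains b = false) (d : PySem.Dict String (List String)) :
    body.foldl (pvAStep keywords) (d, none) = (d, none) := by
  induction body with
  | nil => simp
  | cons b bs ih =>
      have hb : keywords.contains b = false := h b (by simp)
      have hb' : b ∉ keywords := by simpa using hb
      have h1 : pvAStep keywords (d, none) b = (d, none) := by simp [pvAStep, hb']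
      rw [List.foldl_cons, h1]
      exact ih (fun x hx => h x (by simp [hx]))

-- main invariant: A's line loop and B's run loop agree from any common state
theorem pv_main (keywords : List String) :
    ∀ (n : ℕ) (lines : List String), lines.length ≤ n →
    ∀ (segs : PySem.Dict String (List String)) (cur : Option String),
    (lines.foldl (pvAStep keywords) (segs, cur)).1
      = pvBRuns (PySem.Set.ofList keywords) segs cur lines := by
  intro n
  induction n with
  | zero =>
      intro lines hlen segs cur
      have : lines = [] := List.length_eq_zero_iff.mp (Nat.le_zero.mp hlen)
      subst this; simp [pvBRuns]
  | succ m ih =>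
      intro lines hlen segs cur
      match lines with
      | [] => simp [pvBRuns]
      | head :: tail =>
          set p : String → Bool := fun l => !(PySem.Set.ofList keywords).contains l with hp
          have hpeq : p = fun l => !decide (l ∈ keywords) := by
            funext l; simp [hp]
          have hsplit : tail.takeWhile p ++ tail.dropWhile p = tail :=
            List.takeWhile_append_dropWhile
          have hbodyfree : ∀ b ∈ tail.takeWhile p, keywords.contains b = false := by
            intro b hb
            have := List.mem_takeWhile_imp hb
            simp only [hp, Bool.not_eq_eq_eq_not, Bool.not_true] at this
            rw [pv_contains_ofList] at this
            exact this
          have hlen' : (tail.dropWhile p).length ≤ m := by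
            have h1 : (tail.dropWhile p).length ≤ tail.length := List.length_dropWhile_le _ _
            have h2 : tail.length ≤ m := by simpa using Nat.lt_succ_iff.mp (Nat.lt_of_lt_of_le (by simp) hlen)
            omega
          rw [pvBRuns]
          conv_lhs => rw [← hsplit]
          rw [List.foldl_cons, List.foldl_append]
          by_cases hhead : keywords.contains head = true
          · -- head is a keyword: current becomes head on both sides
            have hmem : head ∈ keywords := by simpa using hhead
            have h1 : pvAStep keywords (segs, cur) head
                = (segs.modify head [] (fun xs => xs ++ [head]), some head) := by
              simp [pvAStep, hmem]
            rw [h1, pv_foldl_body_some keywords _ hbodyfree [head] segs head, ih _ hlen']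
            simp [hmem, hpeq]
          · simp only [Bool.not_eq_true] at hhead
            have hmem : head ∉ keywords := by simpa using hhead
            match cur with
            | none =>
                have h1 : pvAStep keywords (segs, none) head = (segs, none) := by
                  simp [pvAStep, hmem]
                rw [h1, pv_foldl_body_none keywords _ hbodyfree segs, ih _ hlen']
                simp [hmem, hpeq]
            | some k =>
                have h1 : pvAStep keywords (segs, some k) head
                    = (segs.modify k [] (fun xs => xs ++ [head]), some k) := by
                  simp [pvAStep, hmem]
                rw [h1, pv_foldl_body_some keywords _ hbodyfree [head] segs k, ih _ hlen']
                simp [hmem, hpeq]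

-- ===== VERDICT (by name: the statement is the Claim_ definition above) =====
theorem split_by_keywords_spec : Claim_equal_split_by_keywords := by
  intro lines keywords _ _
  show split_by_keywords lines keywords = split_by_keywords_alt lines keywords
  unfold split_by_keywords split_by_keywords_alt
  simp only []
  rw [pv_main keywords lines.length lines (le_refl _)]
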